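-- pv_equiv track=rewrite | github.com/antonioguj/bronchinet | src/common/functionutil.py | get_string_datatype
-- ===== SOURCE A (Python) =====
-- from typing import List, Tuple, Dict, Callable, Union, Any
--
-- def split_string_list_or_tuple(in_str: str) -> List[str]:
--     in_str_content = in_str[1:-1].replace(' ', '')
--     if ('[' in in_str_content) and (']' in in_str_content):
--         in_str_content_split = in_str_content.rsplit('],')
--         num_elems = len(in_str_content_split)
--         return [(elem + ']') if i < (num_elems - 1) else elem for i, elem in enumerate(in_str_content_split)]
--     elif ('(' in in_str_content) and (')' in in_str_content):
--         in_str_content_split = in_str_content.rsplit('),')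
--         num_elems = len(in_str_content_split)
--         return [(elem + ')') if i < (num_elems - 1) else elem for i, elem in enumerate(in_str_content_split)]
--     else:
--         return in_str_content.rsplit(',')
--
-- def is_string_bool(in_str: str) -> bool:
--     return in_str.lower() in ('yes', 'true', 'no', 'false')
--
-- def is_string_int(in_str: str) -> bool:
--     return in_str.isdigit()
--
-- def is_string_float(in_str: str) -> bool:
--     return (in_str.count('.') == 1) and (in_str.replace('.', '', 1).isdigit())
--
-- def is_string_list(in_str: str) -> bool:
--     return (in_str[0] == '[') and (in_str[-1] == ']')
--
-- def is_string_tuple(in_str: str) -> bool: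
--     return (in_str[0] == '(') and (in_str[-1] == ')')
--
-- def get_string_datatype(in_str: str) -> str:
--     if is_string_bool(in_str):
--         out_datatype = 'bool'
--     elif is_string_int(in_str):
--         out_datatype = 'int'
--     elif is_string_float(in_str):
--         out_datatype = 'float'
--     elif is_string_list(in_str):
--         out_datatype = 'list'
--         list_elems_list = split_string_list_or_tuple(in_str)
--         out_elem_datatype = get_string_datatype(list_elems_list[0])
--         out_datatype += '_' + out_elem_datatype
--     elif is_string_tuple(in_str):
--         out_datatype = 'tuple'
--         list_elems_tuple = split_string_list_or_tuple(in_str)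
--         out_elem_datatype = get_string_datatype(list_elems_tuple[0])
--         out_datatype += '_' + out_elem_datatype
--     else:
--         out_datatype = 'string'
--     return out_datatype
-- ===== SOURCE B (Python) =====
-- # B: iterative loop with a prefix accumulator instead of recursion; scalar kind decided by
-- # one counting pass; first element extracted directly with str.find instead of building the
-- # whole rsplit list.
--
-- def _scalar_type(s):
--     if s.lower() in ('yes', 'true', 'no', 'false'):
--         return 'bool'
--     digits = sum(c.isdigit() for c in s)
--     if digits == len(s) and s:
--         return 'int'
--     if s.count('.') == 1 and digits == len(s) - 1 and len(s) >= 2: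
--         return 'float'
--     return None
--
-- def _first_element(s):
--     content = s[1:-1].replace(' ', '')
--     if '[' in content and ']' in content:
--         sep, close = '],', ']'
--     elif '(' in content and ')' in content:
--         sep, close = '),', ')'
--     else:
--         sep, close = ',', ''
--     cut = content.find(sep)
--     return content if cut < 0 else content[:cut] + close
--
-- def get_string_datatype(in_str: str) -> str:
--     prefix = ''
--     while True:
--         t = _scalar_type(in_str)
--         if t is not None:
--             return prefix + t
--         first, last = in_str[0], in_str[-1]
--         if first == '[' and last == ']':
--             prefix += 'list_'
--         elif first == '(' and last == ')':
--             prefix += 'tuple_'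
--         else:
--             return prefix + 'string'
--         in_str = _first_element(in_str)
-- ===== Notes on version B (the rewrite author's own statement) =====
-- stated objective: alternative
-- what changed: B replaces A's recursion by an iterative loop with a prefix accumulator, decides the scalar kind by one digit-counting pass instead of A's isdigit/replace predicate chain, and extracts the first list/tuple element directly with str.find instead of building the whole rsplit list.
import Mathlib
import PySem

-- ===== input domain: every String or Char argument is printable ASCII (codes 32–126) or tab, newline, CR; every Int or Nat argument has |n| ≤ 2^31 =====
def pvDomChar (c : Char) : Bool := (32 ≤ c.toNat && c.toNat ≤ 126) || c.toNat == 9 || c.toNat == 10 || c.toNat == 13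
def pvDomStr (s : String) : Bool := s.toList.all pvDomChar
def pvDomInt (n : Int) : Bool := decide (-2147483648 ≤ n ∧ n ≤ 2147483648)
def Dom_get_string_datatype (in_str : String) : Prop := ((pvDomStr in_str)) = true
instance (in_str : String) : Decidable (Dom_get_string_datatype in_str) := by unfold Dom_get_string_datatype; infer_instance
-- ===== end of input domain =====

-- B rewrites A's recursion as an iterative descent with a prefix accumulator, decides the scalar
-- kind by one counting pass and takes the first element with str.find instead of building the
-- whole rsplit list (objective: alternative, same asymptotic cost).
-- Recursions below carry a Nat fuel ≥ length + 1 only to be total; it is never exhausted.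

-- ===== PORT A =====

-- in_str.lower() in ('yes', 'true', 'no', 'false')
def isStringBool (s : List Char) : Bool :=
  [String.toList "yes", String.toList "true", String.toList "no",
   String.toList "false"].contains (PySem.Chars.lower s)

-- in_str.isdigit()
def isStringInt (s : List Char) : Bool := PySem.Chars.strIsdigit s

-- hand port of s.replace(old, new, 1) (PySem has no count-limited replace); exact for old ≠ ''
def replaceOnce (old new : List Char) : List Char → List Char
  | [] => []
  | c :: t => if old.isPrefixOf (c :: t) then new ++ (c :: t).drop old.length
              else c :: replaceOnce old new t

-- (in_str.count('.') == 1) and (in_str.replace('.', '', 1).isdigit())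
def isStringFloat (s : List Char) : Bool :=
  (PySem.Chars.count s ['.'] == 1) && PySem.Chars.strIsdigit (replaceOnce ['.'] [] s)

-- (in_str[0] == '[') and (in_str[-1] == ']'); Python raises IndexError on '' (excluded by Pre_)
def isStringList (s : List Char) : Bool :=
  (PySem.List.pyGet? s 0 == some '[') && (PySem.List.pyGet? s (-1) == some ']')

def isStringTuple (s : List Char) : Bool :=
  (PySem.List.pyGet? s 0 == some '(') && (PySem.List.pyGet? s (-1) == some ')')

-- hand port of str.rsplit(sep) with no maxsplit (PySem has no rsplit).  Exact here: for a
-- separator that cannot overlap itself ('],', '),' and ','), rsplit(sep) == split(sep), i.e.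
-- cutting at each leftmost occurrence of sep, which is what this recursion does.
def splitSub (sep : List Char) : Nat → List Char → List (List Char)
  | _, [] => [[]]
  | 0, l => [l]          -- fuel exhausted; never reached with fuel ≥ length
  | fuel + 1, c :: t =>
    if sep ≠ [] ∧ sep.isPrefixOf (c :: t) then
      [] :: splitSub sep fuel ((c :: t).drop sep.length)
    else
      match splitSub sep fuel t with
      | [] => [[c]]      -- unreachable: splitSub never returns []
      | p :: ps => (c :: p) :: ps

-- split_string_list_or_tuple
def splitStringListOrTuple (s : List Char) : List (List Char) :=
  let content := PySem.Chars.replace (PySem.Chars.slice s (some 1) (some (-1))) [' '] []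
  if PySem.Chars.isIn ['['] content && PySem.Chars.isIn [']'] content then
    let parts := splitSub [']', ','] content.length content
    (PySem.List.enumerate parts).map
      (fun ie => if ie.1 < (parts.length : Int) - 1 then ie.2 ++ [']'] else ie.2)
  else if PySem.Chars.isIn ['('] content && PySem.Chars.isIn [')'] content then
    let parts := splitSub [')', ','] content.length content
    (PySem.List.enumerate parts).map
      (fun ie => if ie.1 < (parts.length : Int) - 1 then ie.2 ++ [')'] else ie.2)
  else splitSub [','] content.length content

-- get_string_datatype (list_elems[0] on Python's list is headD []: split never returns [])
def getSDT : Nat → List Char → List Char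
  | 0, _ => String.toList "string"   -- fuel exhausted; never reached with fuel > length
  | fuel + 1, s =>
    if isStringBool s then String.toList "bool"
    else if isStringInt s then String.toList "int"
    else if isStringFloat s then String.toList "float"
    else if isStringList s then
      String.toList "list" ++ String.toList "_" ++ getSDT fuel ((splitStringListOrTuple s).headD [])
    else if isStringTuple s then
      String.toList "tuple" ++ String.toList "_" ++ getSDT fuel ((splitStringListOrTuple s).headD [])
    else String.toList "string"

def get_string_datatype (in_str : String) : String :=
  String.ofList (getSDT (in_str.toList.length + 1) in_str.toList)

-- ===== PORT B =====

-- _scalar_type (sum(c.isdigit() for c in s) is the count of digit characters)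
def altScalarType (s : List Char) : Option (List Char) :=
  if [String.toList "yes", String.toList "true", String.toList "no",
      String.toList "false"].contains (PySem.Chars.lower s) then some (String.toList "bool")
  else
    let digits := s.countP PySem.Chars.isdigit
    if digits == s.length && !s.isEmpty then some (String.toList "int")
    else if (PySem.Chars.count s ['.'] == 1) && ((digits : Int) == (s.length : Int) - 1)
            && (2 ≤ s.length) then some (String.toList "float")
    else none

-- _first_element
def altFirstElem (s : List Char) : List Char :=
  let content := PySem.Chars.replace (PySem.Chars.slice s (some 1) (some (-1))) [' '] []
  let sc : List Char × List Char :=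
    if PySem.Chars.isIn ['['] content && PySem.Chars.isIn [']'] content then ([']', ','], [']'])
    else if PySem.Chars.isIn ['('] content && PySem.Chars.isIn [')'] content then ([')', ','], [')'])
    else ([','], [])
  let cut := PySem.Chars.find content sc.1
  if cut < 0 then content else content.take cut.toNat ++ sc.2

-- the while-loop of B's get_string_datatype, with its prefix accumulator
def altLoop : Nat → List Char → List Char → List Char
  | 0, pre, _ => pre ++ String.toList "string"   -- fuel exhausted; never reached with fuel > length
  | fuel + 1, pre, s =>
    match altScalarType s with
    | some t => pre ++ t
    | none =>
      -- first, last = in_str[0], in_str[-1]: Python raises IndexError on '' (excluded by Pre_)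
      if (PySem.List.pyGet? s 0 == some '[') && (PySem.List.pyGet? s (-1) == some ']') then
        altLoop fuel (pre ++ String.toList "list_") (altFirstElem s)
      else if (PySem.List.pyGet? s 0 == some '(') && (PySem.List.pyGet? s (-1) == some ')') then
        altLoop fuel (pre ++ String.toList "tuple_") (altFirstElem s)
      else pre ++ String.toList "string"

def get_string_datatype_alt (in_str : String) : String :=
  String.ofList (altLoop (in_str.toList.length + 1) [] in_str.toList)

-- ===== PRECONDITION & SPEC =====

-- Both Pythons raise IndexError (in_str[0] on an empty string) iff the input — or, descending
-- through list/tuple brackets, the first element at some depth — is empty and not a scalar;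
-- safeChars is exactly that descent condition (it computes no output value).
def safeChars : Nat → List Char → Bool
  | 0, _ => false
  | fuel + 1, s =>
    -- scalar shapes in closed form: a yes/true/no/false word, all digits, or digits with one '.'
    if isStringBool s || PySem.Chars.strIsdigit s
       || ((PySem.Chars.count s ['.'] == 1)
            && ((s.countP PySem.Chars.isdigit : Int) == (s.length : Int) - 1)
            && (2 ≤ s.length)) then true
    else if s.isEmpty then false
    else if isStringList s || isStringTuple s then safeChars fuel (altFirstElem s)
    else true

-- Pre_ excludes exactly the inputs on which Python A raises IndexError (B raises there too).
def Pre_get_string_datatype (in_str : String) : Prop :=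
  safeChars (in_str.toList.length + 1) in_str.toList = true
instance (in_str : String) : Decidable (Pre_get_string_datatype in_str) := by
  unfold Pre_get_string_datatype; infer_instance

def pvWitness_get_string_datatype : String := "[(1,2),(3.5,4)]"

def Spec_get_string_datatype (in_str : String) (out : String) : Prop := out = get_string_datatype_alt in_str
instance (in_str : String) (out : String) : Decidable (Spec_get_string_datatype in_str out) := by unfold Spec_get_string_datatype; infer_instance

-- ===== CLAIM (what is proved, stated in full; the proofs are below) =====
def Claim_equal_get_string_datatype : Prop := ∀ (in_str : String), Dom_get_string_datatype in_str → Pre_get_string_datatype in_str → Spec_get_string_datatype in_str (get_string_datatype in_str)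

-- ===== LEMMAS AND PROOFS =====

lemma splitSub_ne_nil (sep : List Char) (f : Nat) (l : List Char) : splitSub sep f l ≠ [] := by
  match f, l with
  | _, [] => simp [splitSub]
  | 0, c :: t => simp [splitSub]
  | f + 1, c :: t =>
    rw [splitSub]
    split
    · simp
    · split <;> simp

lemma replace_go_len (old : List Char) : ∀ (fuel : Nat) (l acc : List Char),
    (PySem.Chars.replace.go old [] fuel l acc).length ≤ acc.length + l.length := by
  intro fuel
  induction fuel with
  | zero => intro l acc; simp [PySem.Chars.replace.go]
  | succ f ih =>
    intro l acc
    match l with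
    | [] => simp [PySem.Chars.replace.go]
    | c :: t =>
      rw [PySem.Chars.replace.go]
      split
      · have := ih ((c :: t).drop old.length) acc
        simp only [List.reverse_nil, List.nil_append] at this ⊢
        have hd : ((c :: t).drop old.length).length ≤ t.length + 1 := by
          simp [List.length_drop]
        simp only [List.length_cons]; omega
      · have := ih t (c :: acc)
        simp only [List.length_cons] at this ⊢
        omega

lemma content_len (s : List Char) :
    (PySem.Chars.replace (PySem.Chars.slice s (some 1) (some (-1))) [' '] []).length
      ≤ s.length - 2 := by
  have h1 : (PySem.Chars.slice s (some 1) (some (-1))).length ≤ s.length - 2 := by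
    simp only [PySem.Chars.slice_eq_listSlice, PySem.List.length_slice, PySem.List.clampIdx]
    split_ifs <;> omega
  have h2 := replace_go_len [' '] (PySem.Chars.slice s (some 1) (some (-1))).length
    (PySem.Chars.slice s (some 1) (some (-1))) []
  simp only [List.length_nil, Nat.zero_add] at h2
  calc (PySem.Chars.replace (PySem.Chars.slice s (some 1) (some (-1))) [' '] []).length
      ≤ (PySem.Chars.slice s (some 1) (some (-1))).length := by
        rw [PySem.Chars.replace]; simpa using h2
    _ ≤ s.length - 2 := h1

lemma altFirst_lt (s : List Char) (hne : s ≠ []) : (altFirstElem s).length < s.length := by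
  have hs : 1 ≤ s.length := List.length_pos_iff.mpr hne
  have hc := content_len s
  simp only [altFirstElem]
  set content := PySem.Chars.replace (PySem.Chars.slice s (some 1) (some (-1))) [' '] [] with hcon
  by_cases h1 : (PySem.Chars.isIn ['['] content && PySem.Chars.isIn [']'] content) = true
  · rw [if_pos h1]
    split
    · omega
    · rename_i hcut
      have hcut' : ¬ PySem.Chars.find content [']', ','] < 0 := hcut
      have h0 : (0 : Int) ≤ PySem.Chars.find content [']', ','] := by omega
      have hsp := (PySem.Chars.find_spec h0).1
      have hlen2 : (PySem.Chars.find content [']', ',']).toNat + 2 ≤ content.length := by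
        have := hsp.length_le
        simp [List.length_drop] at this
        omega
      simp only [List.length_append, List.length_take, List.length_cons, List.length_nil]
      have h3 := Nat.min_le_left (PySem.Chars.find content [']', ',']).toNat content.length
      omega
  · rw [if_neg h1]
    by_cases h2 : (PySem.Chars.isIn ['('] content && PySem.Chars.isIn [')'] content) = true
    · rw [if_pos h2]
      split
      · omega
      · rename_i hcut
        have hcut' : ¬ PySem.Chars.find content [')', ','] < 0 := hcut
        have h0 : (0 : Int) ≤ PySem.Chars.find content [')', ','] := by omega
        have hsp := (PySem.Chars.find_spec h0).1
        have hlen2 : (PySem.Chars.find content [')', ',']).toNat + 2 ≤ content.length := by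
          have := hsp.length_le
          simp [List.length_drop] at this
          omega
        simp only [List.length_append, List.length_take, List.length_cons, List.length_nil]
        have h3 := Nat.min_le_left (PySem.Chars.find content [')', ',']).toNat content.length
        omega
    · rw [if_neg h2]
      split
      · omega
      · simp only [List.length_append, List.length_take, List.length_nil]
        have h3 := Nat.min_le_right (PySem.Chars.find content [',']).toNat content.length
        omega

-- scalar classification: A's predicate chain and B's counting pass agree
lemma int_eq (s : List Char) :
    ((s.countP PySem.Chars.isdigit == s.length) && !s.isEmpty) = PySem.Chars.strIsdigit s := by
  rw [Bool.eq_iff_iff]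
  simp [PySem.Chars.strIsdigit, List.countP_eq_length, List.all_eq_true,
    and_comm]

lemma count_go_single (c : Char) : ∀ (fuel : Nat) (l : List Char) (acc : Nat),
    l.length ≤ fuel → PySem.Chars.count.go [c] fuel l acc = acc + l.count c := by
  intro fuel
  induction fuel with
  | zero =>
    intro l acc h
    have : l = [] := by cases l <;> simp_all
    subst this; simp [PySem.Chars.count.go]
  | succ f ih =>
    intro l acc h
    match l with
    | [] => simp [PySem.Chars.count.go]
    | d :: t =>
      rw [PySem.Chars.count.go]
      by_cases hcd : c = d
      · subst hcd
        rw [if_pos (by simp [List.isPrefixOf])]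
        rw [show (c :: t).drop [c].length = t by simp]
        rw [ih t (acc + 1) (by simpa using h)]
        rw [List.count_cons_self]
        omega
      · rw [if_neg (by simp [List.isPrefixOf]; exact fun hh => hcd (by simp [hh]))]
        rw [ih t acc (by simpa using h)]
        have hdc : (d == c) = false := by
          simp only [beq_eq_false_iff_ne, ne_eq]
          exact fun hh => hcd hh.symm
        simp [List.count_cons, hdc]

lemma count_single (c : Char) (s : List Char) : PySem.Chars.count s [c] = s.count c := by
  rw [PySem.Chars.count, if_neg (by simp)]
  simpa using count_go_single c s.length s 0 le_rfl

lemma count_one_decomp (c : Char) (s : List Char) (h : s.count c = 1) :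
    ∃ u v, s = u ++ c :: v ∧ c ∉ u ∧ c ∉ v := by
  have hmem : c ∈ s := List.count_pos_iff.mp (by omega)
  obtain ⟨u, v, rfl⟩ := List.append_of_mem hmem
  refine ⟨u, v, rfl, ?_, ?_⟩ <;>
  · rw [List.count_append, List.count_cons_self] at h
    rw [← List.count_eq_zero (a := c)]
    omega

lemma replaceOnce_decomp (u v : List Char) (hu : '.' ∉ u) :
    replaceOnce ['.'] [] (u ++ '.' :: v) = u ++ v := by
  induction u with
  | nil => simp [replaceOnce, List.isPrefixOf]
  | cons a u ih =>
    have ha : ¬ ('.' = a) := fun h => hu (by simp [← h])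
    rw [List.cons_append, replaceOnce]
    rw [show (['.'].isPrefixOf (a :: (u ++ '.' :: v))) = ('.' == a) by simp [List.isPrefixOf]]
    simp only [beq_iff_eq, ha, if_false]
    rw [ih (fun h => hu (List.mem_cons_of_mem a h))]
    simp

lemma float_iff (s : List Char) (h1 : PySem.Chars.count s ['.'] = 1) :
    PySem.Chars.strIsdigit (replaceOnce ['.'] [] s) = true ↔
      ((s.countP PySem.Chars.isdigit : Int) = (s.length : Int) - 1 ∧ 2 ≤ s.length) := by
  rw [count_single] at h1
  obtain ⟨u, v, rfl, hu, hv⟩ := count_one_decomp '.' s h1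
  rw [replaceOnce_decomp u v hu]
  have hdot : PySem.Chars.isdigit '.' = false := by decide
  have hcu : u.countP PySem.Chars.isdigit ≤ u.length := List.countP_le_length
  have hcv : v.countP PySem.Chars.isdigit ≤ v.length := List.countP_le_length
  constructor
  · intro h
    simp only [PySem.Chars.strIsdigit, Bool.and_eq_true, Bool.not_eq_true',
      List.isEmpty_eq_false_iff, List.all_eq_true] at h
    obtain ⟨hne, hall⟩ := h
    have : (u ++ v).countP PySem.Chars.isdigit = (u ++ v).length :=
      List.countP_eq_length.mpr hall
    simp only [List.countP_append, List.length_append] at this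
    have hlen : 1 ≤ u.length + v.length := by
      rcases (u ++ v).eq_nil_or_concat with h | _
      · exact absurd h hne
      · have := List.length_pos_iff.mpr hne
        simp only [List.length_append] at this; omega
    constructor
    · simp only [List.countP_append, List.countP_cons, hdot, List.length_append,
        List.length_cons]
      push_cast
      omega
    · simp only [List.length_append, List.length_cons]; omega
  · rintro ⟨h2, h3⟩
    simp only [List.countP_append, List.countP_cons, hdot, List.length_append,
      List.length_cons] at h2 h3
    push_cast at h2
    have hall : (u ++ v).countP PySem.Chars.isdigit = (u ++ v).length := by
      simp only [List.countP_append, List.length_append]; omega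
    have hne : (u ++ v) ≠ [] := by
      intro h
      have := congrArg List.length h
      simp only [List.length_append, List.length_nil] at this
      omega
    simp only [PySem.Chars.strIsdigit, Bool.and_eq_true, Bool.not_eq_true',
      List.isEmpty_eq_false_iff, List.all_eq_true]
    exact ⟨hne, List.countP_eq_length.mp hall⟩

lemma scalar_some (s : List Char) :
    altScalarType s =
      (if isStringBool s then some (String.toList "bool")
       else if isStringInt s then some (String.toList "int")
       else if isStringFloat s then some (String.toList "float")
       else none) := by
  simp only [altScalarType, isStringBool, isStringInt, isStringFloat]
  refine if_congr Iff.rfl rfl (if_congr ?_ rfl (if_congr ?_ rfl rfl))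
  · rw [int_eq]
  · simp only [Bool.and_eq_true, beq_iff_eq, decide_eq_true_eq, and_assoc]
    constructor
    · rintro ⟨h1, h2, h3⟩
      exact ⟨h1, (float_iff s h1).mpr ⟨h2, h3⟩⟩
    · rintro ⟨h1, h2⟩
      have h3 := (float_iff s h1).mp h2
      exact ⟨h1, h3.1, h3.2⟩

-- the closed-form float shape used by Pre_ equals A's float predicate
lemma float_shape_eq (s : List Char) :
    ((PySem.Chars.count s ['.'] == 1)
      && ((s.countP PySem.Chars.isdigit : Int) == (s.length : Int) - 1)
      && (2 ≤ s.length)) = isStringFloat s := by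
  rw [Bool.eq_iff_iff]
  simp only [isStringFloat, Bool.and_eq_true, beq_iff_eq, decide_eq_true_eq, and_assoc]
  constructor
  · rintro ⟨h1, h2, h3⟩
    exact ⟨h1, (float_iff s h1).mpr ⟨h2, h3⟩⟩
  · rintro ⟨h1, h2⟩
    have h3 := (float_iff s h1).mp h2
    exact ⟨h1, h3.1, h3.2⟩

-- first-element extraction: head of A's rsplit list = B's find-based cut
lemma find_prefix_eq_zero (sep l : List Char) (h : sep.isPrefixOf l = true) :
    PySem.Chars.find l sep = 0 := by
  have hpre := List.isPrefixOf_iff_prefix.mp h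
  have h0 : 0 ≤ PySem.Chars.find l sep :=
    (PySem.Chars.find_nonneg_iff l sep).mpr hpre.isInfix
  obtain ⟨hp, hmin⟩ := PySem.Chars.find_spec h0
  have ht : (PySem.Chars.find l sep).toNat = 0 := by
    by_contra hne
    exact hmin 0 (Nat.pos_of_ne_zero hne) (by simpa using hpre)
  omega

lemma find_cons_not_prefix (sep : List Char) (c : Char) (t : List Char)
    (h : sep.isPrefixOf (c :: t) = false) :
    PySem.Chars.find (c :: t) sep =
      (if PySem.Chars.find t sep < 0 then -1 else PySem.Chars.find t sep + 1) := by
  have hnp : ¬ sep <+: (c :: t) := fun hp => by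
    rw [List.isPrefixOf_iff_prefix.mpr hp] at h; exact absurd h (by simp)
  by_cases hft : PySem.Chars.find t sep < 0
  · have hni : ¬ sep <:+: t := by
      intro hi
      have := (PySem.Chars.find_nonneg_iff t sep).mpr hi
      omega
    have : ¬ sep <:+: (c :: t) := by
      rw [List.infix_cons_iff]
      rintro (h1 | h2)
      · exact hnp h1
      · exact hni h2
    rw [(PySem.Chars.find_eq_neg_one_iff (c :: t) sep).mpr this, if_pos hft]
  · have h0t : 0 ≤ PySem.Chars.find t sep := by omega
    obtain ⟨hpt, hmint⟩ := PySem.Chars.find_spec h0t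
    set j := (PySem.Chars.find t sep).toNat with hj
    have hocc : sep <+: (c :: t).drop (j + 1) := by simpa using hpt
    have hinf : sep <:+: (c :: t) := by
      rw [List.infix_cons_iff]
      right
      exact (List.infix_iff_prefix_suffix.mpr ⟨_, hpt, List.drop_suffix _ _⟩)
    have h0 : 0 ≤ PySem.Chars.find (c :: t) sep :=
      (PySem.Chars.find_nonneg_iff _ sep).mpr hinf
    obtain ⟨hp, hmin⟩ := PySem.Chars.find_spec h0
    set f := (PySem.Chars.find (c :: t) sep).toNat with hf
    have hle : f ≤ j + 1 := by
      by_contra hgt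
      exact hmin (j + 1) (by omega) hocc
    have hfne : f ≠ 0 := by
      intro h0'
      rw [h0'] at hp
      exact hnp (by simpa using hp)
    have hge : j + 1 ≤ f := by
      obtain ⟨k, hk⟩ : ∃ k, f = k + 1 := ⟨f - 1, by omega⟩
      have hpk : sep <+: t.drop k := by rw [hk] at hp; simpa using hp
      by_contra hlt
      exact hmint k (by omega) hpk
    have : f = j + 1 := le_antisymm hle hge
    rw [if_neg hft]
    omega

lemma splitSub_spec (sep : List Char) (hsep : sep ≠ []) (f : Nat) (l : List Char)
    (hf : l.length ≤ f) :
    ((splitSub sep f l).headD [] =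
      (if PySem.Chars.find l sep < 0 then l else l.take (PySem.Chars.find l sep).toNat)) ∧
    ((splitSub sep f l).length = 1 ↔ PySem.Chars.find l sep < 0) := by
  induction f generalizing l with
  | zero =>
    have : l = [] := by cases l <;> simp_all
    subst this
    have hn : PySem.Chars.find [] sep = -1 :=
      (PySem.Chars.find_eq_neg_one_iff [] sep).mpr (by simp [List.infix_nil, hsep])
    simp [splitSub, hn]
  | succ f ih =>
    match l with
    | [] =>
      have hn : PySem.Chars.find [] sep = -1 :=
        (PySem.Chars.find_eq_neg_one_iff [] sep).mpr (by simp [List.infix_nil, hsep])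
      simp [splitSub, hn]
    | c :: t =>
      rw [splitSub]
      cases hpre : sep.isPrefixOf (c :: t) with
      | true =>
        rw [if_pos ⟨hsep, rfl⟩]
        have h0 := find_prefix_eq_zero sep (c :: t) hpre
        have hne := splitSub_ne_nil sep f ((c :: t).drop sep.length)
        constructor
        · simp [h0]
        · simp only [List.length_cons, h0]
          constructor
          · intro h1
            exfalso
            have : (splitSub sep f ((c :: t).drop sep.length)).length = 0 := by omega
            exact hne (List.length_eq_zero_iff.mp this)
          · intro h; omega
      | false =>
        rw [if_neg (fun hh => by exact absurd hh.2 (by simp))]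
        have hrec := find_cons_not_prefix sep c t hpre
        obtain ⟨p, ps, he⟩ := List.exists_cons_of_ne_nil (splitSub_ne_nil sep f t)
        have iht := ih t (by simpa using hf)
        rw [he] at iht ⊢
        simp only [List.headD_cons, List.length_cons] at iht ⊢
        by_cases hft : PySem.Chars.find t sep < 0
        · rw [if_pos hft] at hrec
          have hps : ps = [] := by
            have := iht.2.mpr hft
            simpa using this
          have hp : p = t := by
            have := iht.1
            rwa [if_pos hft] at this
          subst hps hp
          simp [hrec]
        · rw [if_neg hft] at hrec
          have h0t : 0 ≤ PySem.Chars.find t sep := by omega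
          have hfl : ¬ PySem.Chars.find (c :: t) sep < 0 := by omega
          constructor
          · rw [if_neg hfl, hrec]
            have hp : p = t.take (PySem.Chars.find t sep).toNat := by
              have := iht.1
              rwa [if_neg hft] at this
            rw [hp]
            rw [show (PySem.Chars.find t sep + 1).toNat = (PySem.Chars.find t sep).toNat + 1 by
              omega]
            simp [List.take_succ_cons]
          · have hlen : ¬ (ps.length + 1 = 1) := by
              intro h1
              exact hft (iht.2.mp h1)
            constructor
            · intro h1; exact absurd h1 hlen
            · intro h1; exact absurd h1 hfl

lemma firstElems_eq (s : List Char) :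
    (splitStringListOrTuple s).headD [] = altFirstElem s := by
  simp only [splitStringListOrTuple, altFirstElem]
  set content := PySem.Chars.replace (PySem.Chars.slice s (some 1) (some (-1))) [' '] [] with hcon
  split
  · -- '[' branch, sep = '],' close = ']'
    obtain ⟨hhead, hlen⟩ := splitSub_spec [']', ','] (by simp) content.length content le_rfl
    obtain ⟨p, ps, he⟩ :=
      List.exists_cons_of_ne_nil (splitSub_ne_nil [']', ','] content.length content)
    rw [he] at hhead hlen ⊢
    simp only [List.headD_cons, List.length_cons] at hhead hlen ⊢
    simp only [PySem.List.enumerate_cons, List.map_cons, List.headD_cons]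
    by_cases hcut : PySem.Chars.find content [']', ','] < 0
    · have hps : ps = [] := by simpa using hlen.mpr hcut
      subst hps
      rw [if_pos hcut] at hhead
      rw [if_pos hcut, if_neg (by norm_num)]
      exact hhead
    · have hps : ps ≠ [] := fun h => hcut (hlen.mp (by simp [h]))
      have h1 : 1 ≤ ps.length := List.length_pos_iff.mpr hps
      rw [if_neg hcut] at hhead
      rw [if_neg hcut, if_pos (by push_cast; omega), hhead]
  · split
    · -- '(' branch, sep = '),' close = ')'
      obtain ⟨hhead, hlen⟩ := splitSub_spec [')', ','] (by simp) content.length content le_rfl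
      obtain ⟨p, ps, he⟩ :=
        List.exists_cons_of_ne_nil (splitSub_ne_nil [')', ','] content.length content)
      rw [he] at hhead hlen ⊢
      simp only [List.headD_cons, List.length_cons] at hhead hlen ⊢
      simp only [PySem.List.enumerate_cons, List.map_cons, List.headD_cons]
      by_cases hcut : PySem.Chars.find content [')', ','] < 0
      · have hps : ps = [] := by simpa using hlen.mpr hcut
        subst hps
        rw [if_pos hcut] at hhead
        rw [if_pos hcut, if_neg (by norm_num)]
        exact hhead
      · have hps : ps ≠ [] := fun h => hcut (hlen.mp (by simp [h]))
        have h1 : 1 ≤ ps.length := List.length_pos_iff.mpr hps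
        rw [if_neg hcut] at hhead
        rw [if_neg hcut, if_pos (by push_cast; omega), hhead]
    · -- ',' branch, no closing bracket
      obtain ⟨hhead, _⟩ := splitSub_spec [','] (by simp) content.length content le_rfl
      rw [hhead]
      by_cases hcut : PySem.Chars.find content [','] < 0
      · rw [if_pos hcut, if_pos hcut]
      · rw [if_neg hcut, if_neg hcut]
        simp

lemma toList_list_underscore :
    String.toList "list_" = String.toList "list" ++ String.toList "_" := by decide

lemma toList_tuple_underscore :
    String.toList "tuple_" = String.toList "tuple" ++ String.toList "_" := by decide

lemma main_lemma : ∀ (f : Nat) (s : List Char), s.length < f → safeChars f s = true →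
    ∀ pre : List Char, altLoop f pre s = pre ++ getSDT f s := by
  intro f
  induction f with
  | zero => intro s h; omega
  | succ f ih =>
    intro s hlen hsafe pre
    rw [altLoop, getSDT, scalar_some]
    rw [safeChars] at hsafe
    cases hb : isStringBool s with
    | true => simp
    | false =>
    cases hi : isStringInt s with
    | true => simp
    | false =>
    cases hfl : isStringFloat s with
    | true => simp
    | false =>
    rw [float_shape_eq] at hsafe
    have hi' : PySem.Chars.strIsdigit s = false := hi
    simp only [hb, hi', hfl, Bool.false_or, Bool.false_eq_true, if_false] at hsafe
    simp only [Bool.false_eq_true, if_false]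
    have hne : s.isEmpty = false := by
      cases hemp : s.isEmpty
      · rfl
      · rw [hemp] at hsafe; simp at hsafe
    rw [hne] at hsafe
    simp only [Bool.false_eq_true, if_false] at hsafe
    have hne' : s ≠ [] := by simpa using hne
    cases hl : isStringList s with
    | true =>
      have hcond : (PySem.List.pyGet? s 0 == some '[' && PySem.List.pyGet? s (-1) == some ']') = true := hl
      rw [hcond]
      rw [hl, Bool.true_or] at hsafe
      rw [if_pos rfl] at hsafe
      rw [if_pos rfl, if_pos rfl]
      have hlt := altFirst_lt s hne'
      rw [ih (altFirstElem s) (by omega) hsafe]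
      rw [← firstElems_eq, toList_list_underscore]
      simp [List.append_assoc]
    | false =>
    have hcond : (PySem.List.pyGet? s 0 == some '[' && PySem.List.pyGet? s (-1) == some ']') = false := hl
    rw [hcond]
    simp only [Bool.false_eq_true, if_false]
    cases ht : isStringTuple s with
    | true =>
      have hcond2 : (PySem.List.pyGet? s 0 == some '(' && PySem.List.pyGet? s (-1) == some ')') = true := ht
      rw [hcond2]
      rw [hl, ht, Bool.false_or] at hsafe
      rw [if_pos rfl] at hsafe
      rw [if_pos rfl, if_pos rfl]
      have hlt := altFirst_lt s hne'
      rw [ih (altFirstElem s) (by omega) hsafe]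
      rw [← firstElems_eq, toList_tuple_underscore]
      simp [List.append_assoc]
    | false =>
      have hcond2 : (PySem.List.pyGet? s 0 == some '(' && PySem.List.pyGet? s (-1) == some ')') = false := ht
      rw [hcond2]
      simp

-- ===== VERDICT (by name: the statement is the Claim_ definition above) =====
theorem get_string_datatype_spec : Claim_equal_get_string_datatype := by
  intro s _ hpre
  unfold Spec_get_string_datatype get_string_datatype get_string_datatype_alt
  rw [main_lemma (s.toList.length + 1) s.toList (by omega) hpre []]
  rfl
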